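-- pv_equiv track=rewrite | github.com/jejeong5976/coding_test | study/브루트포스/3085_사탕게임.py | count_row_max
-- ===== SOURCE A (Python) =====
-- def count_row_max(arr):
--     n,m = len(arr),len(arr[0])
--     max_count = 0
--     for i in range(n):
--         count=1
--         for j in range(1,m):
--             if arr[i][j]==arr[i][j-1]:
--                 count+=1
--             else:
--                 max_count=max(max_count,count)
--                 count=1 # count 다시 시작
--         max_count=max(max_count,count)
--     return max_count
-- ===== SOURCE B (Python) =====
-- def count_row_max(arr):
--     m = len(arr[0])
--     best = 0
--     for row in arr:
--         cuts = [0] + [j for j in range(1, m) if row[j] != row[j-1]] + [m]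
--         best = max(best, 1, max(d - c for c, d in zip(cuts, cuts[1:])))
--     return best
-- ===== Notes on version B (the rewrite author's own statement) =====
-- stated objective: idiomatic
-- what changed: Instead of A's manual running counter with max-updates at each break, B computes per row the list of cut positions (where adjacent cells differ), takes the maximum gap between consecutive cuts (seeded with 1), and maxes across rows.
import Mathlib
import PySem

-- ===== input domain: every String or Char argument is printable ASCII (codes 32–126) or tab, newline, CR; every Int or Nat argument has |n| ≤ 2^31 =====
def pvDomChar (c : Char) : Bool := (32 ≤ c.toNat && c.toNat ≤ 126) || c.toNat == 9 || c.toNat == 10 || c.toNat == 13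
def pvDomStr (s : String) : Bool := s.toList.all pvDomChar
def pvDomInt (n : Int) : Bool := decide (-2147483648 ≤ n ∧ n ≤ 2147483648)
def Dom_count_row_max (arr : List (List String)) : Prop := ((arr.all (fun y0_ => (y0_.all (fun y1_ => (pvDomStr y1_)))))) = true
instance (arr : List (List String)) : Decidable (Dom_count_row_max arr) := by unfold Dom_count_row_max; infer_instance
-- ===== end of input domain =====

-- B replaces A's running counter with per-row cut positions and maximum gaps between
-- consecutive cuts (same cost; a different, more declarative decomposition).

-- ===== PORT A =====
def count_row_max (arr : List (List String)) : Int :=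
  let n : Int := PySem.List.len arr
  let m : Int := PySem.List.len (PySem.List.pyGetD arr 0 [])
  (PySem.List.pyRange 0 n 1).foldl (fun max_count i =>
    let row := PySem.List.pyGetD arr i []
    let s := (PySem.List.pyRange 1 m 1).foldl (fun (s : Int × Int) j =>
      if PySem.List.pyGetD row j "" == PySem.List.pyGetD row (j - 1) "" then
        (s.1, s.2 + 1)
      else
        (max s.1 s.2, 1)) (max_count, 1)
    max s.1 s.2) 0

-- ===== PORT B =====
def count_row_max_alt (arr : List (List String)) : Int :=
  let m : Int := PySem.List.len (PySem.List.pyGetD arr 0 [])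
  arr.foldl (fun best row =>
    let cuts : List Int := [0] ++ (PySem.List.pyRange 1 m 1).filter
        (fun j => !(PySem.List.pyGetD row j "" == PySem.List.pyGetD row (j - 1) "")) ++ [m]
    let diffs := (cuts.zip cuts.tail).map (fun cd => cd.2 - cd.1)
    max best (max 1 ((PySem.List.max? diffs (fun x => x)).getD 0))) 0

-- ===== PRECONDITION & SPEC =====
-- Pre_ is exactly where Python A returns: arr nonempty (else len(arr[0]) is an IndexError) and,
-- when the first row has at least 2 cells, every row at least as long as the first (else arr[i][j] raises).
def Pre_count_row_max (arr : List (List String)) : Prop :=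
  arr ≠ [] ∧ ∀ row ∈ arr, 2 ≤ (PySem.List.pyGetD arr 0 []).length → (PySem.List.pyGetD arr 0 []).length ≤ row.length
instance (arr : List (List String)) : Decidable (Pre_count_row_max arr) := by unfold Pre_count_row_max; infer_instance
def pvWitness_count_row_max : List (List String) := [["a", "a", "b"], ["b", "b", "b"]]

def Spec_count_row_max (arr : List (List String)) (out : Int) : Prop := out = count_row_max_alt arr
instance (arr : List (List String)) (out : Int) : Decidable (Spec_count_row_max arr out) := by unfold Spec_count_row_max; infer_instance

-- ===== CLAIM (what is proved, stated in full; the proofs are below) =====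
def Claim_equal_count_row_max : Prop := ∀ (arr : List (List String)), Dom_count_row_max arr → Pre_count_row_max arr → Spec_count_row_max arr (count_row_max arr)

-- ===== LEMMAS AND PROOFS =====

-- difference list of consecutive cut positions
def pvDiffs (L : List Int) : List Int := (L.zip L.tail).map (fun cd => cd.2 - cd.1)

-- the value B adds for one row
def pvRowBest (m : Int) (row : List String) : Int :=
  let cuts : List Int := [0] ++ (PySem.List.pyRange 1 m 1).filter
      (fun j => !(PySem.List.pyGetD row j "" == PySem.List.pyGetD row (j - 1) "")) ++ [m]
  max 1 ((PySem.List.max? (pvDiffs cuts) (fun x => x)).getD 0)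

lemma pvDiffs_cons2 (a b : Int) (L : List Int) :
    pvDiffs (a :: b :: L) = (b - a) :: pvDiffs (b :: L) := rfl

lemma pvDiffs_append (L : List Int) (a x : Int) :
    pvDiffs (a :: (L ++ [x])) = pvDiffs (a :: L) ++ [x - (a :: L).getLastD 0] := by
  induction L generalizing a with
  | nil => simp [pvDiffs]
  | cons h t ih =>
    simp only [List.cons_append, pvDiffs_cons2, ih, List.getLastD_eq_getLast?,
      List.getLast?_cons_cons]

lemma pvFoldl_max_shift (t : List Int) (a b : Int) :
    t.foldl max (max a b) = max a (t.foldl max b) := by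
  induction t generalizing b with
  | nil => rfl
  | cons h t ih => simp only [List.foldl_cons, max_assoc]; exact ih (max b h)

-- the invariant of A's inner loop, by induction on m from 1
lemma pvInner_inv (row : List String) (m : Int) (hm : 1 ≤ m) (mc : Int) :
    (PySem.List.pyRange 1 m 1).foldl (fun (s : Int × Int) j =>
      if PySem.List.pyGetD row j "" == PySem.List.pyGetD row (j - 1) "" then
        (s.1, s.2 + 1)
      else
        (max s.1 s.2, 1)) (mc, 1)
    = ((pvDiffs (0 :: (PySem.List.pyRange 1 m 1).filter
          (fun j => !(PySem.List.pyGetD row j "" == PySem.List.pyGetD row (j - 1) "")))).foldl max mc,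
       m - ((PySem.List.pyRange 1 m 1).filter
          (fun j => !(PySem.List.pyGetD row j "" == PySem.List.pyGetD row (j - 1) ""))).getLastD 0) := by
  induction m, hm using Int.le_induction with
  | base => simp [PySem.List.pyRange_one_eq_nil, pvDiffs]
  | succ m hm ih =>
    rw [PySem.List.pyRange_one_succ_right (by omega), List.foldl_append, List.filter_append, ih]
    simp only [List.foldl_cons, List.foldl_nil, List.filter_cons, List.filter_nil]
    by_cases h : (PySem.List.pyGetD row m "" == PySem.List.pyGetD row (m - 1) "") = true
    · rw [if_pos h, if_neg (by simp [h])]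
      simp only [List.append_nil, Prod.mk.injEq]
      exact ⟨trivial, by ring⟩
    · rw [if_neg h, if_pos (by simp at h ⊢; exact h), pvDiffs_append, List.foldl_append,
          List.getLastD_concat]
      simp only [List.foldl_cons, List.foldl_nil, Prod.mk.injEq]
      refine ⟨?_, by ring⟩
      cases F : (PySem.List.pyRange 1 m 1).filter
          (fun j => !(PySem.List.pyGetD row j "" == PySem.List.pyGetD row (j - 1) "")) <;> simp

lemma pvRowBest_ge_one_diffs (m : Int) (hm : 1 ≤ m) (F : List Int)
    (hF : ∀ x ∈ F, 1 ≤ x) :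
    ∃ d t, pvDiffs (0 :: (F ++ [m])) = d :: t ∧ 1 ≤ d := by
  cases F with
  | nil => exact ⟨m - 0, [], rfl, by omega⟩
  | cons f F' =>
    refine ⟨f - 0, pvDiffs (f :: (F' ++ [m])), rfl, ?_⟩
    have := hF f (by simp)
    omega

-- per-row: A's inner computation starting at mc equals max mc (B's per-row value)
lemma pvRow_eq (row : List String) (m : Int) (hm : 0 ≤ m) (mc : Int) :
    (let s := (PySem.List.pyRange 1 m 1).foldl (fun (s : Int × Int) j =>
        if PySem.List.pyGetD row j "" == PySem.List.pyGetD row (j - 1) "" then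
          (s.1, s.2 + 1)
        else
          (max s.1 s.2, 1)) (mc, 1)
     max s.1 s.2)
    = max mc (pvRowBest m row) := by
  rcases eq_or_lt_of_le hm with h0 | h1
  · have hB : pvRowBest m row = 1 := by
      unfold pvRowBest
      rw [← h0, PySem.List.pyRange_one_eq_nil (by omega)]
      simp only [List.filter_nil, List.singleton_append]
      rw [show pvDiffs [(0 : Int), 0] = [0] from rfl, PySem.List.max?_id_cons]
      simp
    rw [hB, ← h0]
    simp [PySem.List.pyRange_one_eq_nil]
  · have h1 : 1 ≤ m := h1
    set F := (PySem.List.pyRange 1 m 1).filter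
        (fun j => !(PySem.List.pyGetD row j "" == PySem.List.pyGetD row (j - 1) "")) with hFdef
    have hFmem : ∀ x ∈ F, 1 ≤ x := by
      intro x hx
      have := List.mem_of_mem_filter hx
      exact (PySem.List.mem_pyRange_one.mp this).1
    simp only [pvInner_inv row m h1 mc]
    obtain ⟨d, t, hdt, hd⟩ := pvRowBest_ge_one_diffs m h1 F hFmem
    have hsplit : pvDiffs ((0 : Int) :: (F ++ [m])) = pvDiffs (0 :: F) ++ [m - ((0:Int) :: F).getLastD 0] :=
      pvDiffs_append F 0 m
    have hlastD : ((0:Int) :: F).getLastD 0 = F.getLastD 0 := by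
      cases F <;> simp
    -- LHS: max (foldl max mc (diffs (0::F))) (m - lastc) = foldl max mc (diffs (0::F++[m]))
    have lhs_eq : max ((pvDiffs (0 :: F)).foldl max mc) (m - F.getLastD 0)
        = (pvDiffs ((0:Int) :: (F ++ [m]))).foldl max mc := by
      rw [hsplit, hlastD, List.foldl_append]
      simp
    -- RHS: B's value
    have hmax? : PySem.List.max? (pvDiffs ((0:Int) :: (F ++ [m]))) (fun x => x)
        = some (t.foldl max d) := by
      rw [hdt]; exact PySem.List.max?_id_cons d t
    have rhs_eq : pvRowBest m row = t.foldl max d := by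
      unfold pvRowBest
      rw [← hFdef]
      simp only [List.cons_append, List.nil_append]
      rw [hmax?]
      simp only [Option.getD_some]
      have : d ≤ t.foldl max d := (PySem.List.le_foldl_max t d).1
      omega
    rw [lhs_eq, rhs_eq, hdt]
    simp only [List.foldl_cons]
    exact pvFoldl_max_shift t mc d

-- ===== VERDICT (by name: the statement is the Claim_ definition above) =====
theorem count_row_max_spec : Claim_equal_count_row_max := by
  intro arr _ _
  unfold Spec_count_row_max count_row_max count_row_max_alt
  simp only [PySem.List.len_eq]
  rw [PySem.List.foldl_pyRange_zero_pyGetD' arr ([] : List String)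
      (fun mc row =>
        let s := (PySem.List.pyRange 1 (PySem.List.pyGetD arr 0 []).length 1).foldl
          (fun (s : Int × Int) j =>
            if PySem.List.pyGetD row j "" == PySem.List.pyGetD row (j - 1) "" then
              (s.1, s.2 + 1)
            else
              (max s.1 s.2, 1)) (mc, 1)
        max s.1 s.2) 0]
  apply PySem.List.foldl_congr_mem
  intro acc row _
  have := pvRow_eq row ((PySem.List.pyGetD arr 0 []).length : Int) (by positivity) acc
  simp only [this]
  rfl
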